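-- pv_equiv track=rewrite | github.com/ArjyeshMohapatra/Locus | backend/app/main.py | _index_added_items_by_hash
-- ===== SOURCE A (Python) =====
-- from typing import Annotated, Any, Awaitable, Callable, Literal
--
-- def _dict_hash(item: dict[str, Any], field: str) -> str:
--     return str(item.get(field) or "").strip()
--
-- def _index_added_items_by_hash(
--     added: list[dict[str, Any]],
-- ) -> dict[str, list[dict[str, Any]]]:
--     indexed: dict[str, list[dict[str, Any]]] = {}
--     for item in added:
--         item_hash = _dict_hash(item, "to_hash")
--         if not item_hash:
--             continue
--         indexed.setdefault(item_hash, []).append(item)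
--     return indexed
-- ===== SOURCE B (Python) =====
-- def _dict_hash(item, field):
--     return str(item.get(field) or "").strip()
--
--
-- def _index_added_items_by_hash(added):
--     # Two-phase plan: hash every item once, collect the distinct non-empty
--     # hashes in first-appearance order, then build each group by one filter
--     # pass per key.
--     hashed = [(_dict_hash(item, "to_hash"), item) for item in added]
--     keys = []
--     for h, _ in hashed:
--         if h and h not in keys:
--             keys.append(h)
--     return {k: [item for h, item in hashed if h == k] for k in keys}
-- ===== Notes on version B (the rewrite author's own statement) =====
-- stated objective: alternative
-- what changed: Replaced A's single-pass dict accumulation with setdefault(...).append by a two-phase plan: compute every item's hash once, collect the distinct non-empty hashes in first-appearance order, then build each group with one filter pass per key.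
import Mathlib
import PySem

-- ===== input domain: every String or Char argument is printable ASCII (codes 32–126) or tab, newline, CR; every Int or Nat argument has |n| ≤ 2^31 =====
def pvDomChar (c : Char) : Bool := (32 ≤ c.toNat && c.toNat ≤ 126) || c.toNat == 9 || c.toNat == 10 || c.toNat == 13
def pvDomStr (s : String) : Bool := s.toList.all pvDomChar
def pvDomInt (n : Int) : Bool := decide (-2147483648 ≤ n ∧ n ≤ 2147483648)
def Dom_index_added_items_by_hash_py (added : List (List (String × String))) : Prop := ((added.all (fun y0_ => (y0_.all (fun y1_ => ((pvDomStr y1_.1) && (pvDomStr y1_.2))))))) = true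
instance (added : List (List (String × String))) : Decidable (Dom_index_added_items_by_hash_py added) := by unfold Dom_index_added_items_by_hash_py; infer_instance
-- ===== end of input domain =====

-- B replaces A's single-pass setdefault/append accumulation by a two-phase plan
-- (hash once, collect distinct keys in order, one filter pass per key); objective: alternative.


-- ===== PORT A =====
-- _dict_hash(item, "to_hash"): item.get = first-match lookup in the association list;
-- `str(x or "")` on string values is the value itself (or "" when missing/empty), then .strip()
def dictHash (item : List (String × String)) : String :=
  PySem.Str.strip ((item.lookup "to_hash").getD "")

-- indexed.setdefault(h, []).append(item): append to the (unique) entry with key h,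
-- or add a new (h, [item]) entry at the end — hand port, exact on assoc lists with unique keys
def pyAppendAt (d : List (String × List (List (String × String)))) (k : String)
    (it : List (String × String)) : List (String × List (List (String × String))) :=
  match d with
  | [] => [(k, [it])]
  | (k', v) :: rest => if k' = k then (k', v ++ [it]) :: rest else (k', v) :: pyAppendAt rest k it

def index_added_items_by_hash_py (added : List (List (String × String))) : List (String × List (List (String × String))) :=
  added.foldl (fun indexed item =>
    let item_hash := dictHash item
    if item_hash = "" then indexed
    else pyAppendAt indexed item_hash item) []

-- ===== PORT B =====
def index_added_items_by_hash_py_alt (added : List (List (String × String))) : List (String × List (List (String × String))) :=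
  let hashed := added.map (fun item => (dictHash item, item))
  let keys := hashed.foldl (fun ks p => if p.1 ≠ "" ∧ p.1 ∉ ks then ks ++ [p.1] else ks) ([] : List String)
  keys.map (fun k => (k, (hashed.filter (fun p => p.1 == k)).map (·.2)))

-- ===== PRECONDITION & SPEC =====
def Spec_index_added_items_by_hash_py (added : List (List (String × String))) (out : List (String × List (List (String × String)))) : Prop := out = index_added_items_by_hash_py_alt added
instance (added : List (List (String × String))) (out : List (String × List (List (String × String)))) : Decidable (Spec_index_added_items_by_hash_py added out) := by unfold Spec_index_added_items_by_hash_py; infer_instance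

-- ===== CLAIM (what is proved, stated in full; the proofs are below) =====
def Claim_equal_index_added_items_by_hash_py : Prop := ∀ (added : List (List (String × String))), Dom_index_added_items_by_hash_py added → Spec_index_added_items_by_hash_py added (index_added_items_by_hash_py added)

-- ===== LEMMAS AND PROOFS =====

-- the key-collection fold of B, specialised to hashes of items
def keyFold (acc : List String) (l : List (List (String × String))) : List String :=
  l.foldl (fun ks it => if dictHash it ≠ "" ∧ dictHash it ∉ ks then ks ++ [dictHash it] else ks) acc

theorem mem_keyFold (l : List (List (String × String))) (acc : List String) (k : String) :
    k ∈ keyFold acc l ↔ k ∈ acc ∨ (k ≠ "" ∧ ∃ it ∈ l, dictHash it = k) := by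
  induction l generalizing acc with
  | nil => simp [keyFold]
  | cons x xs ih =>
    simp only [keyFold, List.foldl_cons] at *
    rw [ih]
    by_cases hx : dictHash x ≠ "" ∧ dictHash x ∉ acc <;>
      simp [hx, List.mem_append] <;> constructor <;> intro h <;> aesop

theorem nodup_keyFold (l : List (List (String × String))) (acc : List String) (h : acc.Nodup) :
    (keyFold acc l).Nodup := by
  induction l generalizing acc with
  | nil => simpa [keyFold]
  | cons x xs ih =>
    simp only [keyFold, List.foldl_cons]
    by_cases hx : dictHash x ≠ "" ∧ dictHash x ∉ acc
    · simp only [if_pos hx]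
      refine ih _ ?_
      simp only [List.nodup_append, List.nodup_singleton, true_and]
      refine ⟨h, ?_⟩
      intro a ha b hb
      simp only [List.mem_singleton] at hb
      subst hb
      exact fun e => hx.2 (e ▸ ha)
    · simp only [if_neg hx]; exact ih _ h

theorem ne_empty_of_mem_keyFold (l : List (List (String × String))) (acc : List String)
    (h : ∀ k ∈ acc, k ≠ "") (k : String) (hk : k ∈ keyFold acc l) : k ≠ "" := by
  rcases (mem_keyFold l acc k).1 hk with h1 | h2
  · exact h k h1
  · exact h2.1

theorem keyFold_append_singleton (acc : List String) (xs : List (List (String × String)))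
    (x : List (String × String)) :
    keyFold acc (xs ++ [x]) =
      if dictHash x ≠ "" ∧ dictHash x ∉ keyFold acc xs then keyFold acc xs ++ [dictHash x]
      else keyFold acc xs := by
  simp [keyFold, List.foldl_append]

theorem pyAppendAt_map_of_mem (ks : List String) (f : String → List (List (String × String)))
    (h : String) (it : List (String × String)) (hmem : h ∈ ks) (hnd : ks.Nodup) :
    pyAppendAt (ks.map (fun k => (k, f k))) h it =
      ks.map (fun k => (k, if k = h then f k ++ [it] else f k)) := by
  induction ks with
  | nil => simp at hmem
  | cons a as ih =>
    simp only [List.map_cons, pyAppendAt]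
    rcases List.mem_cons.1 hmem with rfl | hmem'
    · have hnotin := (List.nodup_cons.1 hnd).1
      rw [if_pos rfl, if_pos rfl]
      congr 1
      apply List.map_congr_left
      intro k hk
      rw [if_neg ?_]
      intro e; subst e; exact hnotin hk
    · have hne : a ≠ h := fun e => (List.nodup_cons.1 hnd).1 (e ▸ hmem')
      simp only [if_neg hne, ih hmem' (List.nodup_cons.1 hnd).2]

theorem pyAppendAt_map_of_not_mem (ks : List String) (f : String → List (List (String × String)))
    (h : String) (it : List (String × String)) (hmem : h ∉ ks) :
    pyAppendAt (ks.map (fun k => (k, f k))) h it =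
      ks.map (fun k => (k, f k)) ++ [(h, [it])] := by
  induction ks with
  | nil => simp [pyAppendAt]
  | cons a as ih =>
    have hne : a ≠ h := fun e => hmem (e ▸ List.mem_cons_self)
    simp only [List.map_cons, pyAppendAt, if_neg hne, List.cons_append]
    rw [ih (fun hm => hmem (List.mem_cons_of_mem _ hm))]

-- the grouped form of both programs
def grouped (l : List (List (String × String))) : List (String × List (List (String × String))) :=
  (keyFold [] l).map (fun k => (k, l.filter (fun it => dictHash it == k)))

theorem build_eq_grouped (l : List (List (String × String))) :
    index_added_items_by_hash_py l = grouped l := by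
  induction l using List.reverseRecOn with
  | nil => simp [index_added_items_by_hash_py, grouped, keyFold]
  | append_singleton xs x ih =>
    have hbuild : index_added_items_by_hash_py (xs ++ [x]) =
        (if dictHash x = "" then index_added_items_by_hash_py xs
         else pyAppendAt (index_added_items_by_hash_py xs) (dictHash x) x) := by
      simp [index_added_items_by_hash_py, List.foldl_append]
    rw [hbuild, ih]
    have hfilter_ne : ∀ k : String, dictHash x ≠ k →
        (xs ++ [x]).filter (fun it => dictHash it == k) = xs.filter (fun it => dictHash it == k) := by
      intro k hk
      simp [List.filter_append, hk]
    by_cases hx : dictHash x = ""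
    · -- empty hash: skipped by both sides
      rw [if_pos hx]
      unfold grouped
      rw [keyFold_append_singleton]
      rw [if_neg (by simp [hx])]
      apply List.map_congr_left
      intro k hk
      have hkne : k ≠ "" := ne_empty_of_mem_keyFold xs [] (by simp) k hk
      rw [hfilter_ne k (fun e => hkne (hx ▸ e.symm))]
    · rw [if_neg hx]
      by_cases hmem : dictHash x ∈ keyFold [] xs
      · -- existing key: append into its group
        unfold grouped
        rw [keyFold_append_singleton, if_neg (by simp [hmem])]
        rw [pyAppendAt_map_of_mem _ _ _ _ hmem (nodup_keyFold xs [] (by simp))]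
        apply List.map_congr_left
        intro k hk
        by_cases hkx : k = dictHash x
        · subst hkx
          simp [List.filter_append]
        · rw [if_neg hkx, hfilter_ne k (fun e => hkx e.symm)]
      · -- new key: a fresh group at the end
        unfold grouped
        rw [keyFold_append_singleton, if_pos ⟨hx, hmem⟩]
        rw [pyAppendAt_map_of_not_mem _ _ _ _ hmem, List.map_append]
        congr 1
        · apply List.map_congr_left
          intro k hk
          rw [hfilter_ne k (fun e => hmem (e ▸ hk))]
        · -- no earlier item has this hash
          have hnone : xs.filter (fun it => dictHash it == dictHash x) = [] := by
            rw [List.filter_eq_nil_iff]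
            intro it hit
            simp only [beq_iff_eq]
            intro e
            exact hmem ((mem_keyFold xs [] (dictHash x)).2 (Or.inr ⟨hx, it, hit, e⟩))
          simp [List.filter_append, hnone]

theorem alt_eq_grouped (l : List (List (String × String))) :
    index_added_items_by_hash_py_alt l = grouped l := by
  unfold index_added_items_by_hash_py_alt grouped keyFold
  simp only [List.foldl_map, List.filter_map, List.map_map]
  congr 1
  funext k
  congr 1
  simp [Function.comp_def]

-- ===== VERDICT (by name: the statement is the Claim_ definition above) =====
theorem index_added_items_by_hash_py_spec : Claim_equal_index_added_items_by_hash_py := by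
  intro added _
  unfold Spec_index_added_items_by_hash_py
  rw [build_eq_grouped, alt_eq_grouped]
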